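-- pv_equiv track=rewrite | github.com/Ofir408/MyProjects | Python - Machine Learning/boolean_conj_predictor.py | ConsistencyAlgorithm
-- ===== SOURCE A (Python) =====
-- def ConsistencyAlgorithm(X, Y, d, numberOfExamples):
--     # initialize all_negative_hypothesis
--     h = []
--     for i in range(1, d + 1):
--         h.append(i)
--         h.append(-i) # since we want the negative of each element in all_negative_hypothesis.
--     hPrev = h
--     # finish to build all_negative
--
--     for instanceIndex in range(0, numberOfExamples):
--         h = hPrev
--         if Y[instanceIndex] == 1 and checkIfTrue(X[instanceIndex], h) == 0:
--             for index in range(0, len(X[instanceIndex])):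
--                 currentIndexVal = X[instanceIndex][index]
--
--                 if currentIndexVal == 1:
--                     if (-(index+1)) in h:
--                         h.remove(-(index+1))
--                 if currentIndexVal == 0:
--                     if (index+1) in h:
--                         h.remove(index + 1)
--
--         hPrev = h
--     return h
--
-- def checkIfTrue(xListFromFile, v):
--     zerosAndOnesList = [convertToVal(xListFromFile, current) for current in v]
--     # now we have list with zeros and ones, return true if and between them returns true. Otherwise false.
--     for i in zerosAndOnesList:
--         if i == 0:
--             return False # since 0 &&.... && = 0 always.
--     return True
--
-- def convertToVal(xListFromFile, x):
--     if (x > 0):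
--         toReturn = xListFromFile[x - 1]  # since the first value in list is for x1 and not x0.
--     else:
--         toReturn = (xListFromFile[-x - 1] + 1) % 2  # if 0 now it's 1, if 0 now it's 2.
--     return toReturn
-- ===== SOURCE B (Python) =====
-- def ConsistencyAlgorithm(X, Y, d, numberOfExamples):
--     # column-wise aggregate over the positive examples instead of incremental
--     # literal removal from a maintained hypothesis list
--     rows = [X[t] for t in range(numberOfExamples) if Y[t] == 1]
--     h = []
--     for i in range(d):
--         if not any(i < len(r) and r[i] == 0 for r in rows):
--             h.append(i + 1)
--         if not any(i < len(r) and r[i] == 1 for r in rows):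
--             h.append(-(i + 1))
--     return h
-- ===== Notes on version B (the rewrite author's own statement) =====
-- stated objective: simpler
-- what changed: B replaces A's incremental removal of literals from a maintained hypothesis list (with a consistency-check guard and helper functions) by a single column-wise aggregate: for each coordinate it scans the collected positive examples once and emits +i / -i directly in order.
import Mathlib
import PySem

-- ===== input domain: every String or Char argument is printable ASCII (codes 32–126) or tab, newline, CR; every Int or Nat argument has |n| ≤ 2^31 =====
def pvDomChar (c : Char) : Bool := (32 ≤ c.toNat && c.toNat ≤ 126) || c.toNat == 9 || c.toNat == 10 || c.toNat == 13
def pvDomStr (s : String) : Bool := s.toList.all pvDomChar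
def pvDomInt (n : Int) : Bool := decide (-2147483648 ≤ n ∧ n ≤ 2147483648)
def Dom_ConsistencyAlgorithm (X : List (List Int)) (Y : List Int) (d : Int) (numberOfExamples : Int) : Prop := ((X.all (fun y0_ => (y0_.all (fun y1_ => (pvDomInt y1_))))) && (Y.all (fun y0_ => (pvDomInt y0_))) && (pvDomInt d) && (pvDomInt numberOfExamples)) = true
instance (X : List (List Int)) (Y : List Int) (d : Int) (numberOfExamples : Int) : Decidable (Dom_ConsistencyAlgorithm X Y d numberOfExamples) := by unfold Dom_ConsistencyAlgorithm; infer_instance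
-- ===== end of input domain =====

-- B replaces A's incremental removal of literals from a maintained hypothesis list by a
-- single column-wise pass over the positive examples (objective: simpler, same asymptotic cost).

-- ===== PORT A =====
-- list accesses are written with getD; Pre_ below guarantees every access the Python
-- performs is in range, so getD is exact there (out of range the Python raises IndexError)
def pvConvertToVal (row : List Int) (x : Int) : Int :=
  if x > 0 then row.getD (x - 1).toNat 0
  else PySem.Int.mod (row.getD (-x - 1).toNat 0 + 1) 2

def pvCheckIfTrue (row : List Int) (v : List Int) : Bool :=
  -- 'for i in zerosAndOnesList: if i == 0: return False' / 'return True'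
  (v.map (pvConvertToVal row)).all (fun i => i != 0)

def pvRemovalStep (row : List Int) (h : List Int) (idx : Nat) : List Int :=
  let cv := row.getD idx 0
  let h1 := if cv = 1 then (if (-((idx : Int) + 1)) ∈ h then h.erase (-((idx : Int) + 1)) else h) else h
  if cv = 0 then (if ((idx : Int) + 1) ∈ h1 then h1.erase ((idx : Int) + 1) else h1) else h1

def ConsistencyAlgorithm (X : List (List Int)) (Y : List Int) (d : Int) (numberOfExamples : Int) : List Int :=
  let h0 := (PySem.List.pyRange 1 (d + 1) 1).foldl (fun h i => (h ++ [i]) ++ [-i]) []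
  (List.range numberOfExamples.toNat).foldl (fun hPrev t =>
    let row := X.getD t []
    if Y.getD t 0 = 1 ∧ pvCheckIfTrue row hPrev = false then
      (List.range row.length).foldl (pvRemovalStep row) hPrev
    else hPrev) h0

-- ===== PORT B =====
def ConsistencyAlgorithm_alt (X : List (List Int)) (Y : List Int) (d : Int) (numberOfExamples : Int) : List Int :=
  let rows := (List.range numberOfExamples.toNat).filterMap
    (fun t => if Y.getD t 0 = 1 then some (X.getD t []) else none)
  (List.range d.toNat).foldl (fun h i =>
    let h := if rows.any (fun r => decide (i < r.length) && (r.getD i 0 == 0)) then h else h ++ [(i : Int) + 1]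
    if rows.any (fun r => decide (i < r.length) && (r.getD i 0 == 1)) then h else h ++ [-((i : Int) + 1)]) []

-- ===== PRECONDITION & SPEC =====
-- pvSurv X Y t i b: no positive example before t has value b at column i (so the literal
-- +(i+1) (b = 0) resp. -(i+1) (b = 1) is still in the hypothesis when example t is checked)
def pvSurv (X : List (List Int)) (Y : List Int) (t i : Nat) (b : Int) : Bool :=
  (List.range t).all (fun s =>
    !((Y.getD s 0 == 1) && decide (i < (X.getD s []).length) && ((X.getD s []).getD i 0 == b)))

-- Pre_ excludes exactly the inputs on which the Python A raises an IndexError: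
-- numberOfExamples beyond len(Y); a positive example (Y[t]==1) with X[t] missing; or a
-- positive example at which some literal still surviving in the hypothesis indexes past
-- the row's end inside convertToVal.
def Pre_ConsistencyAlgorithm (X : List (List Int)) (Y : List Int) (d : Int) (numberOfExamples : Int) : Prop :=
  numberOfExamples ≤ (Y.length : Int) ∧
  (∀ t, t < numberOfExamples.toNat → Y.getD t 0 = 1 → t < X.length) ∧
  (∀ t, t < numberOfExamples.toNat → Y.getD t 0 = 1 →
    ∀ i, i < d.toNat → (pvSurv X Y t i 0 = true ∨ pvSurv X Y t i 1 = true) →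
      i < (X.getD t []).length)
instance (X : List (List Int)) (Y : List Int) (d : Int) (numberOfExamples : Int) : Decidable (Pre_ConsistencyAlgorithm X Y d numberOfExamples) := by unfold Pre_ConsistencyAlgorithm; infer_instance

def pvWitness_ConsistencyAlgorithm : List (List Int) × List Int × Int × Int := ([[1, 0], [1, 1]], [1, 1], 2, 2)

def Spec_ConsistencyAlgorithm (X : List (List Int)) (Y : List Int) (d : Int) (numberOfExamples : Int) (out : List Int) : Prop := out = ConsistencyAlgorithm_alt X Y d numberOfExamples
instance (X : List (List Int)) (Y : List Int) (d : Int) (numberOfExamples : Int) (out : List Int) : Decidable (Spec_ConsistencyAlgorithm X Y d numberOfExamples out) := by unfold Spec_ConsistencyAlgorithm; infer_instance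

-- ===== CLAIM (what is proved, stated in full; the proofs are below) =====
def Claim_equal_ConsistencyAlgorithm : Prop := ∀ (X : List (List Int)) (Y : List Int) (d : Int) (numberOfExamples : Int), Dom_ConsistencyAlgorithm X Y d numberOfExamples → Pre_ConsistencyAlgorithm X Y d numberOfExamples → Spec_ConsistencyAlgorithm X Y d numberOfExamples (ConsistencyAlgorithm X Y d numberOfExamples)
-- ===== LEMMAS AND PROOFS =====

-- "index idx of row removes literal v"
def pvRemovesIdx (row : List Int) (idx : Nat) (v : Int) : Bool :=
  ((row.getD idx 0 == 0) && (v == (idx : Int) + 1)) || ((row.getD idx 0 == 1) && (v == -((idx : Int) + 1)))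

def pvRemovesUpto (row : List Int) (n : Nat) (v : Int) : Bool :=
  (List.range n).any (fun i => pvRemovesIdx row i v)

-- literal v survives the first n examples
def pvKeepAll (X : List (List Int)) (Y : List Int) (n : Nat) (v : Int) : Bool :=
  (List.range n).all (fun t => !(Y.getD t 0 == 1) || !(pvRemovesUpto (X.getD t []) (X.getD t []).length v))

theorem pvRemovalStep_eq_filter (row : List Int) (h : List Int) (idx : Nat) (hn : h.Nodup) :
    pvRemovalStep row h idx = h.filter (fun v => !pvRemovesIdx row idx v) := by
  simp only [pvRemovalStep]
  by_cases h0 : row.getD idx 0 = 0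
  · rw [if_neg (by omega : ¬row.getD idx 0 = 1), if_pos h0]
    have h0' := h0
    rw [List.getD_eq_getElem?_getD] at h0'
    by_cases hm : ((idx : Int) + 1) ∈ h
    · rw [if_pos hm, List.Nodup.erase_eq_filter hn]
      refine List.filter_congr (fun v _ => ?_)
      rw [Bool.eq_iff_iff]
      simp [pvRemovesIdx, h0']
    · rw [if_neg hm, Eq.comm]
      refine List.filter_eq_self.mpr (fun v hv => ?_)
      simp [pvRemovesIdx, h0']
      rintro rfl
      exact hm hv
  · by_cases h1 : row.getD idx 0 = 1
    · rw [if_pos h1, if_neg h0]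
      have h1' := h1
      rw [List.getD_eq_getElem?_getD] at h1'
      by_cases hm : (-((idx : Int) + 1)) ∈ h
      · rw [if_pos hm, List.Nodup.erase_eq_filter hn]
        refine List.filter_congr (fun v _ => ?_)
        rw [Bool.eq_iff_iff]
        simp [pvRemovesIdx, h1']
      · rw [if_neg hm, Eq.comm]
        refine List.filter_eq_self.mpr (fun v hv => ?_)
        simp [pvRemovesIdx, h1']
        intro hveq
        apply hm
        have hv' : v = -((idx : Int) + 1) := by omega
        rwa [hv'] at hv
    · rw [if_neg h1, if_neg h0, Eq.comm]
      refine List.filter_eq_self.mpr (fun v _ => ?_)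
      have h0' := h0
      have h1' := h1
      rw [List.getD_eq_getElem?_getD] at h0' h1'
      simp [pvRemovesIdx, h0', h1']

theorem pvRemovalPass_eq_filter (row : List Int) (h : List Int) (hn : h.Nodup) (n : Nat) :
    (List.range n).foldl (pvRemovalStep row) h = h.filter (fun v => !pvRemovesUpto row n v) := by
  induction n with
  | zero => simp [pvRemovesUpto]
  | succ n ih =>
    rw [List.range_succ, List.foldl_append, ih, List.foldl_cons, List.foldl_nil,
      pvRemovalStep_eq_filter row _ n (hn.filter _), List.filter_filter]
    refine List.filter_congr (fun v _ => ?_)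
    rw [Bool.eq_iff_iff]
    simp [pvRemovesUpto, List.range_succ]
    tauto

-- if a literal evaluates to nonzero on row, no index of row removes it
theorem pvKeep_of_convert_ne_zero (row : List Int) (v : Int)
    (hc : pvConvertToVal row v ≠ 0) : pvRemovesUpto row row.length v = false := by
  by_contra hrem
  rw [Bool.not_eq_false] at hrem
  simp only [pvRemovesUpto, List.any_eq_true, List.mem_range] at hrem
  obtain ⟨i, hi, hidx⟩ := hrem
  simp only [pvRemovesIdx, Bool.or_eq_true, Bool.and_eq_true, beq_iff_eq] at hidx
  rcases hidx with ⟨h0, rfl⟩ | ⟨h1, rfl⟩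
  · apply hc
    have ht : ((i : Int) + 1 - 1).toNat = i := by omega
    rw [pvConvertToVal, if_pos (by omega : ((i : Int) + 1) > 0), ht, h0]
  · apply hc
    have hpos : ¬(-((i : Int) + 1) > 0) := by omega
    have ht : (-(-((i : Int) + 1)) - 1).toNat = i := by omega
    rw [pvConvertToVal, if_neg hpos, ht, h1]
    decide

theorem pvCheck_true_keeps (row : List Int) (h : List Int)
    (hc : pvCheckIfTrue row h = true) (v : Int) (hv : v ∈ h) :
    pvRemovesUpto row row.length v = false := by
  apply pvKeep_of_convert_ne_zero
  simp only [pvCheckIfTrue, List.all_eq_true, List.mem_map] at hc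
  have := hc _ ⟨v, hv, rfl⟩
  simpa using this

theorem pvKeepAll_succ (X : List (List Int)) (Y : List Int) (n : Nat) (v : Int) :
    pvKeepAll X Y (n + 1) v =
      (pvKeepAll X Y n v &&
        (!(Y.getD n 0 == 1) || !(pvRemovesUpto (X.getD n []) (X.getD n []).length v))) := by
  simp [pvKeepAll, List.range_succ]

theorem pvOuter_eq_filter (X : List (List Int)) (Y : List Int) (h0 : List Int)
    (hn : h0.Nodup) (n : Nat) :
    (List.range n).foldl (fun hPrev t =>
      let row := X.getD t []
      if Y.getD t 0 = 1 ∧ pvCheckIfTrue row hPrev = false then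
        (List.range row.length).foldl (pvRemovalStep row) hPrev
      else hPrev) h0 = h0.filter (pvKeepAll X Y n) := by
  induction n with
  | zero =>
    rw [List.range_zero, List.foldl_nil, Eq.comm]
    exact List.filter_eq_self.mpr (fun v _ => rfl)
  | succ n ih =>
    rw [List.range_succ, List.foldl_append, ih, List.foldl_cons, List.foldl_nil]
    simp only
    by_cases hy : Y.getD n 0 = 1
    · have hyb : (Y.getD n 0 == 1) = true := beq_iff_eq.mpr hy
      by_cases hck : pvCheckIfTrue (X.getD n []) (h0.filter (pvKeepAll X Y n)) = false
      · rw [if_pos ⟨hy, hck⟩, pvRemovalPass_eq_filter _ _ (hn.filter _), List.filter_filter]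
        refine List.filter_congr (fun v _ => ?_)
        rw [pvKeepAll_succ, hyb]
        cases pvKeepAll X Y n v <;>
          cases pvRemovesUpto (X.getD n []) (X.getD n []).length v <;> simp
      · rw [if_neg (by tauto)]
        rw [Bool.not_eq_false] at hck
        refine List.filter_congr (fun v hv => ?_)
        rw [pvKeepAll_succ, hyb]
        cases h1 : pvKeepAll X Y n v
        · rw [Bool.false_and]
        · have hvmem : v ∈ h0.filter (pvKeepAll X Y n) := List.mem_filter.mpr ⟨hv, h1⟩
          rw [pvCheck_true_keeps _ _ hck v hvmem]
          rfl
    · have hyb : (Y.getD n 0 == 1) = false := beq_eq_false_iff_ne.mpr hy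
      rw [if_neg (by tauto)]
      refine List.filter_congr (fun v _ => ?_)
      rw [pvKeepAll_succ, hyb]
      simp

-- the initial all-literals hypothesis
theorem pvInit_eq_flatMap (d : Int) :
    (PySem.List.pyRange 1 (d + 1) 1).foldl (fun h i => (h ++ [i]) ++ [-i]) [] =
      (List.range d.toNat).flatMap (fun (i : Nat) => [(i : Int) + 1, -((i : Int) + 1)]) := by
  rw [PySem.List.pyRange_one]
  have ht : (d + 1 - 1).toNat = d.toNat := by omega
  rw [ht]
  induction d.toNat with
  | zero => simp
  | succ n ih =>
    rw [List.range_succ]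
    simp only [List.map_append, List.foldl_append, List.flatMap_append, ih]
    simp [add_comm]

theorem pvInit_nodup (d : Int) :
    ((List.range d.toNat).flatMap (fun (i : Nat) => [(i : Int) + 1, -((i : Int) + 1)])).Nodup := by
  induction d.toNat with
  | zero => simp
  | succ n ih =>
    rw [List.range_succ, List.flatMap_append]
    apply List.Nodup.append ih
    · simp only [List.flatMap_cons, List.flatMap_nil, List.append_nil]
      refine List.nodup_cons.mpr ⟨?_, List.nodup_singleton _⟩
      simp only [List.mem_singleton]
      omega
    · intro a ha hb
      simp only [List.mem_flatMap, List.mem_range, List.mem_cons,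
        List.flatMap_cons, List.flatMap_nil, List.append_nil, List.not_mem_nil, or_false] at ha hb
      obtain ⟨i, hi, hv⟩ := ha
      rcases hv with rfl | rfl <;> rcases hb with h | h <;> omega

-- the column conditions of B, through pvRemovesUpto
theorem pvRemovesUpto_pos (row : List Int) (i : Nat) :
    pvRemovesUpto row row.length ((i : Int) + 1) =
      (decide (i < row.length) && (row.getD i 0 == 0)) := by
  rw [Bool.eq_iff_iff]
  simp only [pvRemovesUpto, List.any_eq_true, List.mem_range, pvRemovesIdx, Bool.or_eq_true,
    Bool.and_eq_true, beq_iff_eq, decide_eq_true_eq]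
  constructor
  · rintro ⟨j, hj, ⟨hz, he⟩ | ⟨hz, he⟩⟩
    · have : j = i := by omega
      subst this; exact ⟨hj, hz⟩
    · omega
  · rintro ⟨hi, hz⟩
    exact ⟨i, hi, Or.inl ⟨hz, rfl⟩⟩

theorem pvRemovesUpto_neg (row : List Int) (i : Nat) :
    pvRemovesUpto row row.length (-((i : Int) + 1)) =
      (decide (i < row.length) && (row.getD i 0 == 1)) := by
  rw [Bool.eq_iff_iff]
  simp only [pvRemovesUpto, List.any_eq_true, List.mem_range, pvRemovesIdx, Bool.or_eq_true,
    Bool.and_eq_true, beq_iff_eq, decide_eq_true_eq]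
  constructor
  · rintro ⟨j, hj, ⟨hz, he⟩ | ⟨hz, he⟩⟩
    · omega
    · have : j = i := by omega
      subst this; exact ⟨hj, hz⟩
  · rintro ⟨hi, hz⟩
    exact ⟨i, hi, Or.inr ⟨hz, rfl⟩⟩

-- pvKeepAll as "no collected positive row kills v"
theorem pvKeepAll_eq_not_any (X : List (List Int)) (Y : List Int) (n : Nat) (v : Int)
    (f : List Int → Bool) (hf : ∀ row, pvRemovesUpto row row.length v = f row) :
    pvKeepAll X Y n v =
      !((List.range n).filterMap (fun t => if Y.getD t 0 = 1 then some (X.getD t []) else none)).any f := by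
  rw [Bool.eq_iff_iff]
  constructor
  · intro hall
    rw [Bool.not_eq_true', List.any_eq_false]
    intro r hr
    rw [List.mem_filterMap] at hr
    obtain ⟨t, ht, hsome⟩ := hr
    rw [List.mem_range] at ht
    by_cases hy : Y.getD t 0 = 1
    · rw [if_pos hy] at hsome
      cases hsome
      rw [pvKeepAll, List.all_eq_true] at hall
      have h2 := hall t (List.mem_range.mpr ht)
      rw [beq_iff_eq.mpr hy] at h2
      rw [Bool.not_true, Bool.false_or, Bool.not_eq_true', hf] at h2
      intro hc
      rw [h2] at hc
      cases hc
    · rw [if_neg hy] at hsome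
      cases hsome
  · intro hnone
    rw [Bool.not_eq_true', List.any_eq_false] at hnone
    rw [pvKeepAll, List.all_eq_true]
    intro t ht
    rw [List.mem_range] at ht
    by_cases hy : Y.getD t 0 = 1
    · have hr : (X.getD t []) ∈ (List.range n).filterMap
          (fun t => if Y.getD t 0 = 1 then some (X.getD t []) else none) :=
        List.mem_filterMap.mpr ⟨t, List.mem_range.mpr ht, by rw [if_pos hy]⟩
      have h2 := hnone _ hr
      rw [← hf, Bool.not_eq_true] at h2
      rw [beq_iff_eq.mpr hy, Bool.not_true, Bool.false_or, h2]
      rfl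
    · rw [beq_eq_false_iff_ne.mpr hy]
      rfl

-- B's fold builds the flatMap of per-column blocks
theorem pvFold_pairs (qP qN : Nat → Bool) (n : Nat) (acc : List Int) :
    (List.range n).foldl (fun h i =>
        let h' := if qP i then h else h ++ [(i : Int) + 1]
        if qN i then h' else h' ++ [-((i : Int) + 1)]) acc =
      acc ++ (List.range n).flatMap (fun (i : Nat) =>
        (if qP i then [] else [(i : Int) + 1]) ++ (if qN i then [] else [-((i : Int) + 1)])) := by
  induction n generalizing acc with
  | zero => simp
  | succ n ih =>
    rw [List.range_succ, List.foldl_append, ih, List.flatMap_append, List.foldl_cons,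
      List.foldl_nil]
    simp only [List.flatMap_cons, List.flatMap_nil, List.append_nil]
    by_cases hp : qP n <;> by_cases hq : qN n <;> simp [hp, hq]

theorem pvFilter_pair (p : Int → Bool) (a b : Int) :
    ([a, b]).filter p = (if p a then [a] else []) ++ (if p b then [b] else []) := by
  cases hpa : p a <;> cases hpb : p b <;> simp [List.filter, hpa, hpb]

-- filter distributes over the flatMap of blocks
theorem pvFilter_flatMap (p : Int → Bool) (g : Nat → List Int) (n : Nat) :
    ((List.range n).flatMap g).filter p = (List.range n).flatMap (fun i => (g i).filter p) := by
  induction n with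
  | zero => simp
  | succ n ih =>
    rw [List.range_succ, List.flatMap_append, List.filter_append, ih, List.flatMap_append]
    simp

-- ===== VERDICT (by name: the statement is the Claim_ definition above) =====
theorem ConsistencyAlgorithm_spec : Claim_equal_ConsistencyAlgorithm := by
  intro X Y d N _ _
  unfold Spec_ConsistencyAlgorithm
  unfold ConsistencyAlgorithm ConsistencyAlgorithm_alt
  simp only
  rw [pvInit_eq_flatMap d, pvOuter_eq_filter X Y _ (pvInit_nodup d) N.toNat,
    pvFilter_flatMap, pvFold_pairs, List.nil_append]
  refine List.flatMap_congr (fun i _ => ?_)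
  rw [pvFilter_pair]
  rw [pvKeepAll_eq_not_any X Y N.toNat _ _ (fun row => pvRemovesUpto_pos row i),
    pvKeepAll_eq_not_any X Y N.toNat _ _ (fun row => pvRemovesUpto_neg row i)]
  cases ((List.range N.toNat).filterMap (fun t => if Y.getD t 0 = 1 then some (X.getD t []) else none)).any
      (fun r => decide (i < r.length) && (r.getD i 0 == 0)) <;>
    cases ((List.range N.toNat).filterMap (fun t => if Y.getD t 0 = 1 then some (X.getD t []) else none)).any
      (fun r => decide (i < r.length) && (r.getD i 0 == 1)) <;> simp
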